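-- pv_equiv track=rewrite | github.com/Preponderous-Software/roam | src/config/keyBindings.py | getConflictsForBindings
-- ===== SOURCE A (Python) =====
-- def getConflictsForBindings(bindings):
--     """Return a set of actions that share a key with another action in the given bindings dict."""
--     keyToActions = {}
--     for action, key in bindings.items():
--         keyToActions.setdefault(key, []).append(action)
--     conflicting = set()
--     for actions in keyToActions.values():
--         if len(actions) > 1:
--             conflicting.update(actions)
--     return conflicting
-- ===== SOURCE B (Python) =====
-- def getConflictsForBindings(bindings):
--     """Return a set of actions that share a key with another action in the given bindings dict."""
--     counts = {}
--     for key in bindings.values():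
--         counts[key] = counts.get(key, 0) + 1
--     return {action
--             for key, c in counts.items() if c > 1
--             for action, k in bindings.items() if k == key}
-- ===== Notes on version B (the rewrite author's own statement) =====
-- stated objective: alternative
-- what changed: B replaces A's key->list-of-actions grouping dict and bucket unions by a key->count dict built in one pass, then a set comprehension that re-scans the bindings once per duplicate key to collect its actions.
import Mathlib
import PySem

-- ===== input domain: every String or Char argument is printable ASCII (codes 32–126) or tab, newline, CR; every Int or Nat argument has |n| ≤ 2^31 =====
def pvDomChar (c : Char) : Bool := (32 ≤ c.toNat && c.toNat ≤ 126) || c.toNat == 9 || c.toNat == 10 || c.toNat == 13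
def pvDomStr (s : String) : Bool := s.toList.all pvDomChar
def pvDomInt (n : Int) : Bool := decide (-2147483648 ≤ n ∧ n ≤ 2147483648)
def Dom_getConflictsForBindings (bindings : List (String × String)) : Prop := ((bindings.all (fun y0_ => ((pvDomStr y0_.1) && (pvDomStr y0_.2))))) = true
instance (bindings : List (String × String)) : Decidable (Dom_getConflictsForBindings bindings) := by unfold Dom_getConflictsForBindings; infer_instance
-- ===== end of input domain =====

-- B replaces the key->actions grouping dict and bucket unions by a key->count dict plus a
-- per-duplicate-key re-scan of the bindings (alternative structure, same results).

-- ===== PORT A =====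
def getConflictsForBindings (bindings : List (String × String)) : List String :=
  -- keyToActions.setdefault(key, []).append(action)  ==  d[key] = d.get(key, []) + [action]
  let keyToActions : PySem.Dict String (List String) :=
    bindings.foldl (fun d p => d.modify p.2 [] (· ++ [p.1])) PySem.Dict.empty
  keyToActions.values.foldl
    (fun conflicting actions =>
      if actions.length > 1 then PySem.Set.update conflicting actions else conflicting)
    PySem.Set.empty

-- ===== PORT B =====
def getConflictsForBindings_alt (bindings : List (String × String)) : List String :=
  let counts : PySem.Dict String Int :=
    bindings.foldl (fun d p => d.insert p.2 (d.getD p.2 0 + 1)) PySem.Dict.empty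
  -- {action for key, c in counts.items() if c > 1 for action, k in bindings.items() if k == key}
  counts.items.foldl
    (fun s kc =>
      if kc.2 > 1 then
        bindings.foldl (fun s p => if p.2 == kc.1 then PySem.Set.add s p.1 else s) s
      else s)
    PySem.Set.empty

-- ===== PRECONDITION & SPEC =====
-- Pre_ excludes lists whose first components (the dict keys 'action') repeat: such a list encodes
-- no Python dict, so neither Python program receives it (bindings is a dict in both).
def Pre_getConflictsForBindings (bindings : List (String × String)) : Prop :=
  (bindings.map (·.1)).Nodup
instance (bindings : List (String × String)) : Decidable (Pre_getConflictsForBindings bindings) := by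
  unfold Pre_getConflictsForBindings; infer_instance
def pvWitness_getConflictsForBindings : (List (String × String)) :=
  [("up", "w"), ("jump", "w"), ("down", "s")]

def Spec_getConflictsForBindings (bindings : List (String × String)) (out : List String) : Prop := out = getConflictsForBindings_alt bindings
instance (bindings : List (String × String)) (out : List String) : Decidable (Spec_getConflictsForBindings bindings out) := by unfold Spec_getConflictsForBindings; infer_instance

-- ===== CLAIM (what is proved, stated in full; the proofs are below) =====
def Claim_equal_getConflictsForBindings : Prop := ∀ (bindings : List (String × String)), Dom_getConflictsForBindings bindings → Pre_getConflictsForBindings bindings → Spec_getConflictsForBindings bindings (getConflictsForBindings bindings)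

-- ===== LEMMAS AND PROOFS =====

-- a guarded fold is the fold over the filtered list
theorem foldl_filter_if {α β : Type} (l : List α) (p : α → Bool) (g : β → α → β) (init : β) :
    l.foldl (fun s x => if p x then g s x else s) init = (l.filter p).foldl g init := by
  induction l generalizing init with
  | nil => rfl
  | cons x t ih => by_cases h : p x <;> simp [h, ih]

-- the two ports agree on every list (the addition sequences into the result set coincide:
-- for each key in first-occurrence order with more than one entry, its actions in binding order)
theorem getConflictsForBindings_eq_alt (bindings : List (String × String)) :
    getConflictsForBindings bindings = getConflictsForBindings_alt bindings := by
  unfold getConflictsForBindings getConflictsForBindings_alt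
  simp only []
  set KA := bindings.foldl (fun d p => d.modify p.2 [] (· ++ [p.1])) PySem.Dict.empty with hKA
  have hswap : KA = (bindings.map Prod.swap).foldl (fun d q => d.modify q.1 [] (· ++ [q.2])) PySem.Dict.empty := by
    rw [List.foldl_map]; rfl
  have hnd : KA.keys.Nodup := by
    rw [hswap]
    exact PySem.Dict.nodup_keys_foldl_modify_key _ _ _ _ _ PySem.Dict.nodup_keys_empty
  have hkeys : KA.keys = PySem.Set.ofList (bindings.map (·.2)) := by
    rw [hswap, PySem.Dict.keys_foldl_modify_key]
    simp [PySem.Set.update, PySem.Set.ofList_eq_foldl, List.map_map, Function.comp_def]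
  have hbucket : ∀ k, KA.getD k [] = (bindings.filter (fun p => p.2 == k)).map (·.1) := by
    intro k
    rw [hswap, PySem.Dict.getD_foldl_modify_append]
    simp [List.filter_map, List.map_map, Function.comp_def]
  have hcounts : bindings.foldl (fun d p => d.insert p.2 (d.getD p.2 0 + 1)) PySem.Dict.empty
      = PySem.Dict.counter (bindings.map (·.2)) := by
    rw [← PySem.Dict.foldl_insert_getD_add_one_eq_counter, List.foldl_map]
  rw [hcounts, PySem.Dict.items_counter]
  rw [PySem.Dict.values_eq_map_keys KA hnd [], hkeys]
  rw [List.foldl_map, List.foldl_map]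
  have hfun : (fun (s : PySem.Set String) (k : String) =>
        if (KA.getD k []).length > 1 then PySem.Set.update s (KA.getD k []) else s)
      = (fun (s : PySem.Set String) (k : String) =>
        if ((bindings.map (·.2)).count k : Int) > 1 then
          bindings.foldl (fun s p => if p.2 == k then PySem.Set.add s p.1 else s) s
        else s) := by
    funext s k
    rw [hbucket k, foldl_filter_if]
    have hlen : ((bindings.filter (fun p => p.2 == k)).map (·.1)).length
        = (bindings.map (·.2)).count k := by
      simp [List.count, List.countP_map, Function.comp_def]
      exact List.countP_eq_length_filter.symm
    rw [hlen]
    have hcast : (1 < ((bindings.map (·.2)).count k : Int)) ↔ 1 < (bindings.map (·.2)).count k := by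
      exact_mod_cast Iff.rfl
    by_cases h : 1 < (bindings.map (·.2)).count k
    · simp only [if_pos h, if_pos (hcast.mpr h)]
      rw [← List.foldl_map]
      rfl
    · simp only [if_neg h, if_neg (fun hh => h (hcast.mp hh))]
  rw [hfun]

-- ===== VERDICT (by name: the statement is the Claim_ definition above) =====
theorem getConflictsForBindings_spec : Claim_equal_getConflictsForBindings := by
  intro bindings _ _
  exact getConflictsForBindings_eq_alt bindings
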